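-- pv_equiv track=rewrite | github.com/ASSERT-KTH/Mokav | experiments/pynguin/c4b/return-lst/generated_tests/src_1252/0/src_1252.py | func
-- ===== SOURCE A (Python) =====
-- def func(*args):
-- 	ret_values = []
--
--
-- 	def answer(n):
-- 	    res = ''
-- 	    for i in range(1, 371):
-- 	        res = (res + str(i))
-- 	    return res[(n - 1)]
-- 	ret_values.append(answer(int(args[0])))
--
-- 	return ret_values
-- ===== SOURCE B (Python) =====
-- def func(*args):
--     ret_values = []
--
--     def answer(n):
--         # arithmetic digit extraction instead of building the 1002-char string
--         L = 9 * 1 + 90 * 2 + 271 * 3  # 1002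
--         idx = n - 1
--         if idx < 0:
--             idx += L
--         if idx < 0 or idx >= L:
--             raise IndexError("string index out of range")
--         if idx < 9:
--             num, pos, width = idx + 1, 0, 1
--         elif idx < 189:
--             num, pos, width = 10 + (idx - 9) // 2, (idx - 9) % 2, 2
--         else:
--             num, pos, width = 100 + (idx - 189) // 3, (idx - 189) % 3, 3
--         return str(num // 10 ** (width - 1 - pos) % 10)
--     ret_values.append(answer(int(args[0])))
--     return ret_values
-- ===== Notes on version B (the rewrite author's own statement) =====
-- stated objective: faster
-- what changed: B computes the requested digit arithmetically (normalise the index, subtract the 1-, 2- and 3-digit group sizes to find the containing number and digit position) instead of concatenating str(1)..str(370) into one long string and indexing it.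
import Mathlib
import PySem

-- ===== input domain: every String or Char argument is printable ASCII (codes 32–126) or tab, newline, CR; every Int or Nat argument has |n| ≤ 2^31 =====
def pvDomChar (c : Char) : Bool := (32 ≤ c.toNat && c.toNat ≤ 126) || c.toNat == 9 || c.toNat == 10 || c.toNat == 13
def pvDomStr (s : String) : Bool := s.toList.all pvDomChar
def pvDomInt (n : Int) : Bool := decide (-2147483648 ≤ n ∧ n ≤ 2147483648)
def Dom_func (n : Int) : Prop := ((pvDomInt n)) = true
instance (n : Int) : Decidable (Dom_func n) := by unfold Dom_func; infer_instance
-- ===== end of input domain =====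

-- B extracts the digit arithmetically (locate the containing number by group-size
-- subtraction) instead of building and indexing the whole '123…370' concatenation.

-- ===== PORT A =====
-- inner 'def answer(n)': build '123…370' by the loop, then index it (Python indexing; none = IndexError)
def pvAnswerA (n : Int) : Option Char :=
  let res : List Char :=
    (PySem.List.pyRange 1 371 1).foldl (fun res i => res ++ PySem.Int.toChars i) []
  PySem.List.pyGet? res (n - 1)

def func (n : Int) : List String :=
  match pvAnswerA n with
  | some c => [String.ofList [c]]  -- ret_values.append(answer(int(args[0])))
  | none => []                     -- IndexError: excluded by Pre_func

-- ===== PORT B =====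
-- inner 'def answer(n)' of B: arithmetic digit extraction; none = B's explicit 'raise IndexError'
def pvAnswerB (n : Int) : Option String :=
  let L : Int := 9 * 1 + 90 * 2 + 271 * 3
  let idx0 := n - 1
  let idx := if idx0 < 0 then idx0 + L else idx0
  if idx < 0 ∨ L ≤ idx then none
  else
    let (num, pos, width) :=
      if idx < 9 then (idx + 1, (0 : Int), (1 : Int))
      else if idx < 189 then (10 + PySem.Int.floordiv (idx - 9) 2, PySem.Int.mod (idx - 9) 2, (2 : Int))
      else (100 + PySem.Int.floordiv (idx - 189) 3, PySem.Int.mod (idx - 189) 3, (3 : Int))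
    -- 10 ** (width - 1 - pos): the exponent is ≥ 0 on every reachable branch, so .toNat is exact
    some (PySem.Int.toStr (PySem.Int.mod (PySem.Int.floordiv num (10 ^ (width - 1 - pos).toNat)) 10))

def func_alt (n : Int) : List String :=
  match pvAnswerB n with
  | some s => [s]
  | none => []                     -- raise IndexError: excluded by Pre_func

-- ===== PRECONDITION & SPEC =====
-- Pre_ excludes exactly the inputs on which A raises IndexError (index n-1 outside the concatenated string).
def Pre_func (n : Int) : Prop := PySem.Raise.InRange 1002 (n - 1)
instance (n : Int) : Decidable (Pre_func n) := by unfold Pre_func; infer_instance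

def pvWitness_func : Int := 100

def Spec_func (n : Int) (out : List String) : Prop := out = func_alt n
instance (n : Int) (out : List String) : Decidable (Spec_func n out) := by unfold Spec_func; infer_instance

-- ===== CLAIM (what is proved, stated in full; the proofs are below) =====
def Claim_equal_func : Prop := ∀ (n : Int), Dom_func n → Pre_func n → Spec_func n (func n)

-- ===== LEMMAS AND PROOFS =====

-- A's loop result as a flatMap (cites the library loop-shape lemma)
theorem pvFold_eq_flatMap :
    (PySem.List.pyRange 1 371 1).foldl (fun res i => res ++ PySem.Int.toChars i) ([] : List Char)
      = (PySem.List.pyRange 1 371 1).flatMap PySem.Int.toChars := by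
  simpa using PySem.List.foldl_append_eq_flatMap PySem.Int.toChars (PySem.List.pyRange 1 371 1) ([] : List Char)

-- B's digit formula at a (non-negative, in-range) position, as its own function
def pvDigitStr (idx : Int) : String :=
  let (num, pos, width) :=
    if idx < 9 then (idx + 1, (0 : Int), (1 : Int))
    else if idx < 189 then (10 + PySem.Int.floordiv (idx - 9) 2, PySem.Int.mod (idx - 9) 2, (2 : Int))
    else (100 + PySem.Int.floordiv (idx - 189) 3, PySem.Int.mod (idx - 189) 3, (3 : Int))
  PySem.Int.toStr (PySem.Int.mod (PySem.Int.floordiv num (10 ^ (width - 1 - pos).toNat)) 10)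

-- the single computational fact: position by position, A's string '123…370' spells B's digits
set_option maxRecDepth 20000 in
set_option maxHeartbeats 16000000 in
theorem pvKey : ((PySem.List.pyRange 1 371 1).flatMap PySem.Int.toChars).map (fun c => String.ofList [c])
    = (PySem.List.pyRange 0 1002 1).map pvDigitStr := by decide

theorem pvLen : ((PySem.List.pyRange 1 371 1).flatMap PySem.Int.toChars).length = 1002 := by
  have h := congrArg List.length pvKey
  simp only [List.length_map, PySem.List.length_pyRange_one] at h
  omega

theorem pvPoint (j : Nat) (hb : j < ((PySem.List.pyRange 1 371 1).flatMap PySem.Int.toChars).length) :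
    String.ofList [((PySem.List.pyRange 1 371 1).flatMap PySem.Int.toChars)[j]] = pvDigitStr (j : Int) := by
  have hl := pvLen
  have hj : j < (PySem.List.pyRange 0 1002 1).length := by
    rw [PySem.List.length_pyRange_one]; omega
  have h := congrArg (fun l => l[j]?) pvKey
  simp only [List.getElem?_map] at h
  rw [List.getElem?_eq_getElem hb, List.getElem?_eq_getElem hj] at h
  rw [PySem.List.getElem_pyRange_one] at h
  simp only [Option.map_some, Option.some.injEq, zero_add] at h
  exact h

theorem pyGet?_norm (xs : List Char) (i : Int) (h : PySem.Raise.InRange xs.length i)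
    (hh : (if i < 0 then i + xs.length else i).toNat < xs.length) :
    PySem.List.pyGet? xs i = some (xs[(if i < 0 then i + xs.length else i).toNat]'hh) := by
  obtain ⟨h1, h2⟩ := h
  simp only [PySem.List.pyGet?, PySem.List.pyIdx?]
  by_cases hneg : i < 0
  · rw [if_neg (by omega), if_pos (by omega)]
    simp only [Option.bind_some]
    rw [List.getElem?_eq_getElem (by omega)]
    simp only [Option.some.injEq]
    congr 1
    omega
  · rw [if_pos (by omega), if_pos (by omega)]
    simp only [Option.bind_some]
    rw [List.getElem?_eq_getElem (by omega)]
    simp only [Option.some.injEq]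
    congr 1
    omega

theorem pvFuncAlt_eq (n : Int) (h : Pre_func n) :
    func_alt n = [pvDigitStr (if n - 1 < 0 then n - 1 + 1002 else n - 1)] := by
  obtain ⟨h1, h2⟩ := h
  unfold func_alt pvAnswerB pvDigitStr
  norm_num
  split_ifs <;> first | rfl | omega

-- ===== VERDICT (by name: the statement is the Claim_ definition above) =====
theorem func_spec : Claim_equal_func := by
  intro n _ hpre
  unfold Spec_func
  have hpre' : PySem.Raise.InRange 1002 (n - 1) := hpre
  obtain ⟨hlo, hhi⟩ := hpre'
  have hInR : PySem.Raise.InRange ((PySem.List.pyRange 1 371 1).flatMap PySem.Int.toChars).length (n - 1) := by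
    rw [pvLen]; exact hpre
  have hh : (if n - 1 < 0 then n - 1 + (((PySem.List.pyRange 1 371 1).flatMap PySem.Int.toChars).length : Int) else n - 1).toNat
      < ((PySem.List.pyRange 1 371 1).flatMap PySem.Int.toChars).length := by
    rw [pvLen]; split_ifs <;> omega
  have hA : func n = [String.ofList [((PySem.List.pyRange 1 371 1).flatMap PySem.Int.toChars)[(if n - 1 < 0 then n - 1 + (((PySem.List.pyRange 1 371 1).flatMap PySem.Int.toChars).length : Int) else n - 1).toNat]'hh]] := by
    unfold func pvAnswerA
    rw [pvFold_eq_flatMap, pyGet?_norm _ _ hInR hh]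
  rw [hA, pvFuncAlt_eq n hpre]
  have hcast : ((((if n - 1 < 0 then n - 1 + (((PySem.List.pyRange 1 371 1).flatMap PySem.Int.toChars).length : Int) else n - 1).toNat : Nat)) : Int)
      = (if n - 1 < 0 then n - 1 + 1002 else n - 1) := by
    rw [pvLen]; split_ifs <;> omega
  rw [pvPoint _ hh, hcast]
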